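-- pv_equiv track=rewrite | github.com/42013/001 | cubepycode/cendcube.py | convert_to_lowercase
-- ===== SOURCE A (Python) =====
-- def convert_to_lowercase(instruction):
--     # 定义转换规则
--     conversion_rules = {
--         'U2': 'u',
--         'D2': 'd',
--         'B2': 'b',
--         'L2': 'l',
--         'F2': 'f',
--         'R2': 'r',
--         "U'": 'Q',
--         "D'": 'W',
--         "B'": 'E',
--         "L'": 'A',
--         "F'": 'S',
--         "R'": 'Z'
--     }
--
--     # 替换特定大写表示法为小写
--     for key, value in conversion_rules.items():
--         instruction = instruction.replace(key, value)
--
--     return instruction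
-- ===== SOURCE B (Python) =====
-- def convert_to_lowercase(instruction):
--     faces = "UDBLFR"
--     prime_map = {'U': 'Q', 'D': 'W', 'B': 'E', 'L': 'A', 'F': 'S', 'R': 'Z'}
--     out = []
--     i = 0
--     n = len(instruction)
--     while i < n:
--         c = instruction[i]
--         nxt = instruction[i + 1] if i + 1 < n else ''
--         if c in faces and nxt == '2':
--             out.append(c.lower())
--             i += 2
--         elif c in faces and nxt == "'":
--             out.append(prime_map[c])
--             i += 2
--         else:
--             out.append(c)
--             i += 1
--     return ''.join(out)
-- ===== Notes on version B (the rewrite author's own statement) =====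
-- stated objective: alternative
-- what changed: Replaces A's twelve sequential whole-string str.replace passes by a single left-to-right character scan that classifies the current char as a face letter and the next as a modifier ('2' -> lowercase the face, apostrophe -> a fixed prime table), with no table of 2-character keys at all.
import Mathlib
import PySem

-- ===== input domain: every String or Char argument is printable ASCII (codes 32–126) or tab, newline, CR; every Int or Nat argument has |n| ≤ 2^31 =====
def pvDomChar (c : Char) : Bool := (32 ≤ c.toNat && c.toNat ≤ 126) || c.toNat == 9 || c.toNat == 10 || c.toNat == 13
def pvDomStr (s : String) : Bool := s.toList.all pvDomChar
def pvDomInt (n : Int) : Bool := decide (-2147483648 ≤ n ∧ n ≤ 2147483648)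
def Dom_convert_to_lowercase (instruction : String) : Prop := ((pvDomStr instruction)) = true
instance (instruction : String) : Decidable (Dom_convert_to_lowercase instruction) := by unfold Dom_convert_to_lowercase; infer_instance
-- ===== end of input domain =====

-- B replaces A's twelve sequential str.replace passes by one character-classifying scan
-- (face letter + modifier character, no table of 2-char keys); same return value, alternative structure.

-- ===== PORT A =====
-- conversion_rules, iterated in insertion order (as dict.items() does)
def pvRulesA : List (String × String) :=
  [("U2","u"),("D2","d"),("B2","b"),("L2","l"),("F2","f"),("R2","r"),
   ("U'","Q"),("D'","W"),("B'","E"),("L'","A"),("F'","S"),("R'","Z")]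

-- the for-loop: instruction = instruction.replace(key, value), one pass per rule
def convert_to_lowercase (instruction : String) : String :=
  pvRulesA.foldl (fun ins kv => PySem.Str.replace ins kv.1 kv.2) instruction

-- ===== PORT B =====
-- Source B's `c in faces` for the one-character c (exact: substring test on a 1-char needle
-- is membership in the character list of "UDBLFR")
def pvIsFace (c : Char) : Bool :=
  c == 'U' || c == 'D' || c == 'B' || c == 'L' || c == 'F' || c == 'R'

-- Source B's prime_map[c]; only ever called with a face letter, so the fallback arm is unreachable
def pvPrime (c : Char) : Char :=
  if c == 'U' then 'Q' else if c == 'D' then 'W' else if c == 'B' then 'E'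
  else if c == 'L' then 'A' else if c == 'F' then 'S' else if c == 'R' then 'Z' else c

-- Source B's while loop: look at the current char c and the next char (if any);
-- face + '2' -> c.lower() and skip both; face + '\'' -> prime table and skip both;
-- otherwise emit c and advance by one.
def pvScanB : List Char → List Char
  | [] => []
  | [c] => [c]
  | c :: d :: tl =>
    if pvIsFace c && d == '2' then Char.toLower c :: pvScanB tl
    else if pvIsFace c && d == '\'' then pvPrime c :: pvScanB tl
    else c :: pvScanB (d :: tl)

def convert_to_lowercase_alt (instruction : String) : String :=
  String.ofList (pvScanB instruction.toList)

-- ===== PRECONDITION & SPEC =====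
def Spec_convert_to_lowercase (instruction : String) (out : String) : Prop := out = convert_to_lowercase_alt instruction
instance (instruction : String) (out : String) : Decidable (Spec_convert_to_lowercase instruction out) := by unfold Spec_convert_to_lowercase; infer_instance

-- ===== CLAIM (what is proved, stated in full; the proofs are below) =====
def Claim_equal_convert_to_lowercase : Prop := ∀ (instruction : String), Dom_convert_to_lowercase instruction → Spec_convert_to_lowercase instruction (convert_to_lowercase instruction)

-- ===== LEMMAS AND PROOFS =====

-- Characterisation of PySem.Chars.replace.go: the accumulator factors out.
theorem go_acc (old new : List Char) : ∀ (fuel : Nat) (l acc : List Char),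
    PySem.Chars.replace.go old new fuel l acc = acc.reverse ++ PySem.Chars.replace.go old new fuel l [] := by
  intro fuel
  induction fuel with
  | zero => intro l acc; simp [PySem.Chars.replace.go]
  | succ f ih =>
    intro l acc
    cases l with
    | nil => simp [PySem.Chars.replace.go]
    | cons c t =>
      simp only [PySem.Chars.replace.go]
      by_cases h : old.isPrefixOf (c :: t)
      · simp only [h, if_true]
        rw [ih _ (new.reverse ++ acc), ih _ (new.reverse ++ [])]
        simp
      · simp only [h]
        rw [ih _ (c :: acc), ih _ [c]]
        simp

-- Any fuel at least the length of the text gives the same result.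
theorem go_fuel (old new : List Char) (hold : old ≠ []) : ∀ (f₁ f₂ : Nat) (l acc : List Char),
    l.length ≤ f₁ → l.length ≤ f₂ →
    PySem.Chars.replace.go old new f₁ l acc = PySem.Chars.replace.go old new f₂ l acc := by
  intro f₁
  induction f₁ with
  | zero =>
    intro f₂ l acc h1 h2
    have : l = [] := by cases l <;> simp_all
    subst this
    cases f₂ <;> simp [PySem.Chars.replace.go]
  | succ f ih =>
    have ho : 0 < old.length := by cases old with | nil => exact absurd rfl hold | cons a t => simp
    intro f₂ l acc h1 h2
    cases l with
    | nil => cases f₂ <;> simp [PySem.Chars.replace.go]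
    | cons c t =>
      cases f₂ with
      | zero => simp at h2
      | succ g =>
        simp only [PySem.Chars.replace.go]
        by_cases h : old.isPrefixOf (c :: t)
        · simp only [h, if_true]
          apply ih
          · simp only [List.length_drop]
            simp at h1 ⊢; omega
          · simp only [List.length_drop]
            simp at h2 ⊢; omega
        · simp only [h]
          apply ih
          · simp at h1 ⊢; omega
          · simp at h2 ⊢; omega

-- The step equations of Chars.replace for a 2-character pattern.
theorem rep_nil (k1 k2 v : Char) : PySem.Chars.replace [] [k1, k2] [v] = [] := by
  simp [PySem.Chars.replace, PySem.Chars.replace.go]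

theorem rep_nomatch (k1 k2 v c : Char) (cs : List Char) (h : ¬ [k1, k2] <+: (c :: cs)) :
    PySem.Chars.replace (c :: cs) [k1, k2] [v] = c :: PySem.Chars.replace cs [k1, k2] [v] := by
  have hb : [k1, k2].isPrefixOf (c :: cs) = false := by
    rw [← Bool.not_eq_true, List.isPrefixOf_iff_prefix]
    exact h
  simp only [PySem.Chars.replace, List.isEmpty_cons, List.length_cons]
  simp only [PySem.Chars.replace.go, hb]
  rw [go_acc _ _ _ _ [c]]
  simp

theorem rep_match (k1 k2 v : Char) (tl : List Char) :
    PySem.Chars.replace (k1 :: k2 :: tl) [k1, k2] [v] = v :: PySem.Chars.replace tl [k1, k2] [v] := by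
  have hb : [k1, k2].isPrefixOf (k1 :: k2 :: tl) = true := by
    rw [List.isPrefixOf_iff_prefix]; exact ⟨tl, rfl⟩
  simp only [PySem.Chars.replace, List.isEmpty_cons, List.length_cons]
  simp only [PySem.Chars.replace.go, hb, if_true, List.length_cons, List.drop_succ_cons]
  rw [go_acc]
  simp [go_fuel [k1,k2] [v] (by simp) (tl.length + 1) tl.length tl [] (by omega) (by omega)]

theorem pre_two_iff (k1 k2 c : Char) (cs : List Char) :
    [k1, k2] <+: (c :: cs) ↔ c = k1 ∧ ∃ tl, cs = k2 :: tl := by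
  constructor
  · rintro ⟨t, ht⟩
    simp only [List.cons_append, List.cons.injEq] at ht
    obtain ⟨h1, h2⟩ := ht
    exact ⟨h1.symm, t, h2.symm⟩
  · rintro ⟨rfl, tl, rfl⟩
    exact ⟨tl, rfl⟩

theorem rep_cons₁ (k1 k2 v c : Char) (cs : List Char) (h : c ≠ k1) :
    PySem.Chars.replace (c :: cs) [k1, k2] [v] = c :: PySem.Chars.replace cs [k1, k2] [v] := by
  apply rep_nomatch
  rw [pre_two_iff]
  rintro ⟨rfl, -⟩
  exact h rfl

theorem rep_cons₂ (k1 k2 v c d : Char) (tl : List Char) (h : d ≠ k2) :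
    PySem.Chars.replace (c :: d :: tl) [k1, k2] [v] = c :: PySem.Chars.replace (d :: tl) [k1, k2] [v] := by
  apply rep_nomatch
  rw [pre_two_iff]
  rintro ⟨-, t, ht⟩
  exact h (by injection ht)

theorem rep_one (k1 k2 v c : Char) : PySem.Chars.replace [c] [k1, k2] [v] = [c] := by
  rw [rep_nomatch, rep_nil]
  rw [pre_two_iff]
  rintro ⟨-, t, ht⟩
  simp at ht

-- A replace pass either keeps the head of the string or replaces it by the value.
theorem head_rep (k1 k2 v : Char) (cs : List Char) :
    (PySem.Chars.replace cs [k1, k2] [v]).head? = cs.head? ∨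
    (PySem.Chars.replace cs [k1, k2] [v]).head? = some v := by
  cases cs with
  | nil => left; rw [rep_nil]
  | cons c cs =>
    by_cases h : [k1, k2] <+: (c :: cs)
    · rw [pre_two_iff] at h
      obtain ⟨rfl, tl, rfl⟩ := h
      right; rw [rep_match]; rfl
    · left; rw [rep_nomatch _ _ _ _ _ h]; rfl

-- A's chain of replace passes, over (first char, second char, value) triples.
def chainC (rs : List (Char × Char × Char)) (cs : List Char) : List Char :=
  rs.foldl (fun s r => PySem.Chars.replace s [r.1, r.2.1] [r.2.2]) cs

def pvCRules : List (Char × Char × Char) :=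
  [('U','2','u'),('D','2','d'),('B','2','b'),('L','2','l'),('F','2','f'),('R','2','r'),
   ('U','\'','Q'),('D','\'','W'),('B','\'','E'),('L','\'','A'),('F','\'','S'),('R','\'','Z')]

theorem chainC_nil (rs : List (Char × Char × Char)) : chainC rs [] = [] := by
  induction rs with
  | nil => rfl
  | cons r rs ih => simp [chainC, List.foldl, rep_nil] at ih ⊢; exact ih

theorem chainC_one (rs : List (Char × Char × Char)) (c : Char) : chainC rs [c] = [c] := by
  induction rs with
  | nil => rfl
  | cons r rs ih => simp [chainC, List.foldl, rep_one] at ih ⊢; exact ih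

-- A head character that is no rule's first character passes through the whole chain.
theorem chainC_pass₁ (rs : List (Char × Char × Char)) (c : Char) (h : ∀ r ∈ rs, c ≠ r.1) :
    ∀ cs, chainC rs (c :: cs) = c :: chainC rs cs := by
  induction rs with
  | nil => intro cs; rfl
  | cons r rs ih =>
    intro cs
    simp only [chainC, List.foldl] at *
    rw [rep_cons₁ _ _ _ _ _ (h r (by simp))]
    exact ih (fun r hr => h r (by simp [hr])) _

def pvSecondOK (o : Option Char) : Prop := ∀ d, o = some d → d ≠ '2' ∧ d ≠ '\''

-- If the next character is neither '2' nor an apostrophe, no rule can match at the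
-- head at any stage of the chain (the values never reintroduce '2' or apostrophes).
theorem chainC_pass₂ (rs : List (Char × Char × Char))
    (hrs : ∀ r ∈ rs, (r.2.1 = '2' ∨ r.2.1 = '\'') ∧ r.2.2 ≠ '2' ∧ r.2.2 ≠ '\'') (c : Char) :
    ∀ cs, pvSecondOK cs.head? → chainC rs (c :: cs) = c :: chainC rs cs := by
  induction rs with
  | nil => intro cs _; rfl
  | cons r rs ih =>
    intro cs hok
    simp only [chainC, List.foldl] at *
    have hstep : PySem.Chars.replace (c :: cs) [r.1, r.2.1] [r.2.2]
        = c :: PySem.Chars.replace cs [r.1, r.2.1] [r.2.2] := by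
      cases cs with
      | nil => rw [rep_one, rep_nil]
      | cons d tl =>
        apply rep_cons₂
        have := hok d rfl
        rcases (hrs r (by simp)).1 with h2 | h2 <;> rw [h2]
        · exact this.1
        · exact this.2
    rw [hstep]
    apply ih (fun r hr => hrs r (by simp [hr]))
    intro d hd
    rcases head_rep r.1 r.2.1 r.2.2 cs with hh | hh
    · exact hok d (hh ▸ hd)
    · rw [hd] at hh
      have : d = r.2.2 := by injection hh.symm with h0; exact h0.symm
      subst this
      exact (hrs r (by simp)).2

-- B-side step equations of the character-classifying scan.
theorem scan_nil : pvScanB [] = [] := by simp [pvScanB]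

theorem scan_one (c : Char) : pvScanB [c] = [c] := by simp [pvScanB]

-- No rule starts here: either the next char is no modifier, or c is no face letter.
theorem scan_pass (c d : Char) (tl : List Char)
    (h : (d ≠ '2' ∧ d ≠ '\'') ∨ (c ≠ 'U' ∧ c ≠ 'D' ∧ c ≠ 'B' ∧ c ≠ 'L' ∧ c ≠ 'F' ∧ c ≠ 'R')) :
    pvScanB (c :: d :: tl) = c :: pvScanB (d :: tl) := by
  rcases h with ⟨h2, h3⟩ | ⟨hU, hD, hB, hL, hF, hR⟩
  · simp [pvScanB, h2, h3]
  · simp [pvScanB, pvIsFace, hU, hD, hB, hL, hF, hR]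

theorem scan_U2 (tl : List Char) : pvScanB ('U'::'2'::tl) = 'u' :: pvScanB tl := by
  simp only [pvScanB]; norm_num [pvIsFace]; decide

theorem scan_D2 (tl : List Char) : pvScanB ('D'::'2'::tl) = 'd' :: pvScanB tl := by
  simp only [pvScanB]; norm_num [pvIsFace]; decide

theorem scan_B2 (tl : List Char) : pvScanB ('B'::'2'::tl) = 'b' :: pvScanB tl := by
  simp only [pvScanB]; norm_num [pvIsFace]; decide

theorem scan_L2 (tl : List Char) : pvScanB ('L'::'2'::tl) = 'l' :: pvScanB tl := by
  simp only [pvScanB]; norm_num [pvIsFace]; decide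

theorem scan_F2 (tl : List Char) : pvScanB ('F'::'2'::tl) = 'f' :: pvScanB tl := by
  simp only [pvScanB]; norm_num [pvIsFace]; decide

theorem scan_R2 (tl : List Char) : pvScanB ('R'::'2'::tl) = 'r' :: pvScanB tl := by
  simp only [pvScanB]; norm_num [pvIsFace]; decide

theorem scan_Up (tl : List Char) : pvScanB ('U'::'\''::tl) = 'Q' :: pvScanB tl := by
  simp [pvScanB, pvIsFace, pvPrime]

theorem scan_Dp (tl : List Char) : pvScanB ('D'::'\''::tl) = 'W' :: pvScanB tl := by
  simp [pvScanB, pvIsFace, pvPrime]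

theorem scan_Bp (tl : List Char) : pvScanB ('B'::'\''::tl) = 'E' :: pvScanB tl := by
  simp [pvScanB, pvIsFace, pvPrime]

theorem scan_Lp (tl : List Char) : pvScanB ('L'::'\''::tl) = 'A' :: pvScanB tl := by
  simp [pvScanB, pvIsFace, pvPrime]

theorem scan_Fp (tl : List Char) : pvScanB ('F'::'\''::tl) = 'S' :: pvScanB tl := by
  simp [pvScanB, pvIsFace, pvPrime]

theorem scan_Rp (tl : List Char) : pvScanB ('R'::'\''::tl) = 'Z' :: pvScanB tl := by
  simp [pvScanB, pvIsFace, pvPrime]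

theorem chain_U2 (tl : List Char) : chainC pvCRules ('U'::'2'::tl) = 'u' :: chainC pvCRules tl := by
  simp only [pvCRules, chainC, List.foldl]
  simp [rep_match, rep_cons₁]

theorem chain_D2 (tl : List Char) : chainC pvCRules ('D'::'2'::tl) = 'd' :: chainC pvCRules tl := by
  simp only [pvCRules, chainC, List.foldl]
  simp [rep_match, rep_cons₁]

theorem chain_B2 (tl : List Char) : chainC pvCRules ('B'::'2'::tl) = 'b' :: chainC pvCRules tl := by
  simp only [pvCRules, chainC, List.foldl]
  simp [rep_match, rep_cons₁]

theorem chain_L2 (tl : List Char) : chainC pvCRules ('L'::'2'::tl) = 'l' :: chainC pvCRules tl := by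
  simp only [pvCRules, chainC, List.foldl]
  simp [rep_match, rep_cons₁]

theorem chain_F2 (tl : List Char) : chainC pvCRules ('F'::'2'::tl) = 'f' :: chainC pvCRules tl := by
  simp only [pvCRules, chainC, List.foldl]
  simp [rep_match, rep_cons₁]

theorem chain_R2 (tl : List Char) : chainC pvCRules ('R'::'2'::tl) = 'r' :: chainC pvCRules tl := by
  simp only [pvCRules, chainC, List.foldl]
  simp [rep_match, rep_cons₁]

theorem chain_Up (tl : List Char) : chainC pvCRules ('U'::'\''::tl) = 'Q' :: chainC pvCRules tl := by
  simp only [pvCRules, chainC, List.foldl]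
  simp [rep_match, rep_cons₁, rep_cons₂]

theorem chain_Dp (tl : List Char) : chainC pvCRules ('D'::'\''::tl) = 'W' :: chainC pvCRules tl := by
  simp only [pvCRules, chainC, List.foldl]
  simp [rep_match, rep_cons₁, rep_cons₂]

theorem chain_Bp (tl : List Char) : chainC pvCRules ('B'::'\''::tl) = 'E' :: chainC pvCRules tl := by
  simp only [pvCRules, chainC, List.foldl]
  simp [rep_match, rep_cons₁, rep_cons₂]

theorem chain_Lp (tl : List Char) : chainC pvCRules ('L'::'\''::tl) = 'A' :: chainC pvCRules tl := by
  simp only [pvCRules, chainC, List.foldl]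
  simp [rep_match, rep_cons₁, rep_cons₂]

theorem chain_Fp (tl : List Char) : chainC pvCRules ('F'::'\''::tl) = 'S' :: chainC pvCRules tl := by
  simp only [pvCRules, chainC, List.foldl]
  simp [rep_match, rep_cons₁, rep_cons₂]

theorem chain_Rp (tl : List Char) : chainC pvCRules ('R'::'\''::tl) = 'Z' :: chainC pvCRules tl := by
  simp only [pvCRules, chainC, List.foldl]
  simp [rep_match, rep_cons₁, rep_cons₂]

-- c is none of the rules' first characters: the whole chain passes it through.
theorem pv_firsts_pass (c : Char)
    (h : c ≠ 'U' ∧ c ≠ 'D' ∧ c ≠ 'B' ∧ c ≠ 'L' ∧ c ≠ 'F' ∧ c ≠ 'R') :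
    ∀ cs, chainC pvCRules (c :: cs) = c :: chainC pvCRules cs := by
  apply chainC_pass₁
  intro r hr
  fin_cases hr <;> simp_all

-- The main equivalence, by strong induction on the length of the character list.
theorem pv_main : ∀ (n : Nat) (cs : List Char), cs.length ≤ n → chainC pvCRules cs = pvScanB cs := by
  intro n
  induction n with
  | zero =>
    intro cs h
    have : cs = [] := by cases cs <;> simp_all
    subst this
    rw [chainC_nil, scan_nil]
  | succ n ih =>
    intro cs h
    match cs with
    | [] => rw [chainC_nil, scan_nil]
    | [c] => rw [chainC_one, scan_one]
    | c :: d :: tl =>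
      have hrec : (d :: tl).length ≤ n := by simp only [List.length_cons] at h ⊢; omega
      by_cases h2 : d = '2'
      · subst h2
        by_cases hcU : c = 'U'
        · subst hcU
          rw [chain_U2, scan_U2, ih tl (by simp only [List.length_cons] at h; omega)]
        by_cases hcD : c = 'D'
        · subst hcD
          rw [chain_D2, scan_D2, ih tl (by simp only [List.length_cons] at h; omega)]
        by_cases hcB : c = 'B'
        · subst hcB
          rw [chain_B2, scan_B2, ih tl (by simp only [List.length_cons] at h; omega)]
        by_cases hcL : c = 'L'
        · subst hcL
          rw [chain_L2, scan_L2, ih tl (by simp only [List.length_cons] at h; omega)]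
        by_cases hcF : c = 'F'
        · subst hcF
          rw [chain_F2, scan_F2, ih tl (by simp only [List.length_cons] at h; omega)]
        by_cases hcR : c = 'R'
        · subst hcR
          rw [chain_R2, scan_R2, ih tl (by simp only [List.length_cons] at h; omega)]
        rw [pv_firsts_pass c ⟨hcU, hcD, hcB, hcL, hcF, hcR⟩ ('2' :: tl)]
        rw [scan_pass c '2' tl (Or.inr ⟨hcU, hcD, hcB, hcL, hcF, hcR⟩)]
        rw [ih ('2' :: tl) hrec]
      by_cases h3 : d = '\''
      · subst h3
        by_cases hcU : c = 'U'
        · subst hcU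
          rw [chain_Up, scan_Up, ih tl (by simp only [List.length_cons] at h; omega)]
        by_cases hcD : c = 'D'
        · subst hcD
          rw [chain_Dp, scan_Dp, ih tl (by simp only [List.length_cons] at h; omega)]
        by_cases hcB : c = 'B'
        · subst hcB
          rw [chain_Bp, scan_Bp, ih tl (by simp only [List.length_cons] at h; omega)]
        by_cases hcL : c = 'L'
        · subst hcL
          rw [chain_Lp, scan_Lp, ih tl (by simp only [List.length_cons] at h; omega)]
        by_cases hcF : c = 'F'
        · subst hcF
          rw [chain_Fp, scan_Fp, ih tl (by simp only [List.length_cons] at h; omega)]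
        by_cases hcR : c = 'R'
        · subst hcR
          rw [chain_Rp, scan_Rp, ih tl (by simp only [List.length_cons] at h; omega)]
        rw [pv_firsts_pass c ⟨hcU, hcD, hcB, hcL, hcF, hcR⟩ ('\'' :: tl)]
        rw [scan_pass c '\'' tl (Or.inr ⟨hcU, hcD, hcB, hcL, hcF, hcR⟩)]
        rw [ih ('\'' :: tl) hrec]
      rw [chainC_pass₂ pvCRules (by decide) c (d :: tl)
        (by intro e he; injection he with he; subst he; exact ⟨h2, h3⟩)]
      rw [scan_pass c d tl (Or.inl ⟨h2, h3⟩)]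
      rw [ih (d :: tl) hrec]

-- Bridge: port A's String-level fold computes chainC on the character list.
theorem pv_A_chain (s : String) : (convert_to_lowercase s).toList = chainC pvCRules s.toList := by
  have e1 : ("U2" : String).toList = ['U','2'] := by decide
  have e2 : ("D2" : String).toList = ['D','2'] := by decide
  have e3 : ("B2" : String).toList = ['B','2'] := by decide
  have e4 : ("L2" : String).toList = ['L','2'] := by decide
  have e5 : ("F2" : String).toList = ['F','2'] := by decide
  have e6 : ("R2" : String).toList = ['R','2'] := by decide
  have e7 : ("U'" : String).toList = ['U','\''] := by decide
  have e8 : ("D'" : String).toList = ['D','\''] := by decide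
  have e9 : ("B'" : String).toList = ['B','\''] := by decide
  have e10 : ("L'" : String).toList = ['L','\''] := by decide
  have e11 : ("F'" : String).toList = ['F','\''] := by decide
  have e12 : ("R'" : String).toList = ['R','\''] := by decide
  have f1 : ("u" : String).toList = ['u'] := by decide
  have f2 : ("d" : String).toList = ['d'] := by decide
  have f3 : ("b" : String).toList = ['b'] := by decide
  have f4 : ("l" : String).toList = ['l'] := by decide
  have f5 : ("f" : String).toList = ['f'] := by decide
  have f6 : ("r" : String).toList = ['r'] := by decide
  have f7 : ("Q" : String).toList = ['Q'] := by decide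
  have f8 : ("W" : String).toList = ['W'] := by decide
  have f9 : ("E" : String).toList = ['E'] := by decide
  have f10 : ("A" : String).toList = ['A'] := by decide
  have f11 : ("S" : String).toList = ['S'] := by decide
  have f12 : ("Z" : String).toList = ['Z'] := by decide
  simp only [convert_to_lowercase, pvRulesA, chainC, pvCRules, List.foldl,
    PySem.Str.toList_replace, e1, e2, e3, e4, e5, e6, e7, e8, e9, e10, e11, e12,
    f1, f2, f3, f4, f5, f6, f7, f8, f9, f10, f11, f12]

-- ===== VERDICT (by name: the statement is the Claim_ definition above) =====
theorem convert_to_lowercase_spec : Claim_equal_convert_to_lowercase := by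
  intro s _
  unfold Spec_convert_to_lowercase convert_to_lowercase_alt
  rw [← pv_main s.toList.length s.toList le_rfl, ← pv_A_chain, String.ofList_toList]
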